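-- pv_equiv track=rewrite | github.com/MateoGonzalezPautaso/fiuba-computer-engineering | TB024-teoria-de-algoritmos/TP2/analizador_optimalidad.py | _maximizar_kills_bt
-- ===== SOURCE A (Python) =====
-- def _maximizar_kills_bt(x, f, n, i, ult_atq, mejor_estado):
--     if i > n:
--         return 0    # kills de aca en adelante
--
--     key = (i, ult_atq)
--     if key in mejor_estado:
--         return mejor_estado[key]    # Ya esta calculado el maximo para este estado
--
--     # Rama 1: no ataco y sigo cargando
--     no_ataco_ahora = _maximizar_kills_bt(x, f, n, i + 1, ult_atq, mejor_estado)
--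
--     # Rama 2: ataco en este minuto
--     j = i - ult_atq
--     kills_i = min(x[i - 1], f[j - 1])
--     ataco_ahora = kills_i + _maximizar_kills_bt(x, f, n, i + 1, i, mejor_estado)
--
--     max_kills = max(no_ataco_ahora, ataco_ahora)
--     mejor_estado[key] = max_kills
--     return max_kills
-- ===== SOURCE B (Python) =====
-- def _mejor_con_ultimo(x, f, n, W, desde, u):
--     # Best kills achievable from minute `desde` onward when the last attack
--     # happened at minute u (0 = never attack again).
--     best = 0
--     for t in range(desde, n + 1):
--         best = max(best, min(x[t - 1], f[t - 1 - u]) + W[t + 1])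
--     return best
--
-- def _maximizar_kills_bt(x, f, n, i, ult_atq, mejor_estado):
--     # Bottom-up DP over a 1-D table: W[j] = best kills from minute j onward
--     # given that an attack happened at minute j - 1.
--     if i > n:
--         return 0
--     W = {n + 1: 0}
--     for j in range(n, i, -1):
--         W[j] = _mejor_con_ultimo(x, f, n, W, j, j - 1)
--     return _mejor_con_ultimo(x, f, n, W, i, ult_atq)
-- ===== Notes on version B (the rewrite author's own statement) =====
-- stated objective: alternative
-- what changed: Replaces the top-down memoized recursion (which reads and mutates the caller's 2-D memo dict) with a clean bottom-up DP over a 1-D table W[j] = best kills from minute j onward given an attack at j-1; B never reads or writes mejor_estado, so Pre_ excludes inputs whose cache already holds an entry at a state the search reaches (there A's result echoes the arbitrary pre-seeded value, including cases where that entry hides an out-of-range index on which both clean computations raise IndexError), and inputs where A raises IndexError.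
-- outside the precondition, e.g. on _maximizar_kills_bt([3, 4], [5, 6], 2, 1, 0, {(2, 0): 9}): A returns 9, B returns 7; on _maximizar_kills_bt([], [5], 2, 1, 0, {(1, 0): 7}): A returns 7, B raises IndexError
import Mathlib
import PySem

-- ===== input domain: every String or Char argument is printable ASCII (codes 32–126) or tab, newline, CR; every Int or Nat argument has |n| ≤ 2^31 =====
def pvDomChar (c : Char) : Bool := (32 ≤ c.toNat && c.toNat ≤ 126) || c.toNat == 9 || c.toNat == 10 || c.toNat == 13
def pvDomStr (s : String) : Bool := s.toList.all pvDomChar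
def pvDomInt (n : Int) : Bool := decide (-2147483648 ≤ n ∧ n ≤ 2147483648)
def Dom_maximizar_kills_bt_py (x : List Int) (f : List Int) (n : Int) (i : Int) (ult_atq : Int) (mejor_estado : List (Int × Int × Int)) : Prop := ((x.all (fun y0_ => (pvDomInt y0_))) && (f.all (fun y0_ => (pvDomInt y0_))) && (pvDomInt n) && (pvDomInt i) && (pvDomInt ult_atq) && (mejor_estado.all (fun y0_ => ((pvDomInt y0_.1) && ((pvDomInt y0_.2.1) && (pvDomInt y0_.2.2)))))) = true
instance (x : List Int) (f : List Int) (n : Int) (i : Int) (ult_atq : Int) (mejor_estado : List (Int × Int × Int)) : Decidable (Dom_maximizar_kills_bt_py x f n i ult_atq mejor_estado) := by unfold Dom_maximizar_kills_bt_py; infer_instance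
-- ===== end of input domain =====

-- B replaces A's top-down memoized recursion by a bottom-up DP over a 1-D table; A mutates the
-- passed-in mejor_estado dict while B never touches it, so the equivalence proved here is about
-- the return value only.

-- ===== PORT A =====
-- the Python dict argument as a PySem.Dict keyed by (i, ult_atq)
def pvToDict (l : List (Int × Int × Int)) : PySem.Dict (Int × Int) Int :=
  l.foldl (fun d t => d.insert (t.1, t.2.1) t.2.2) PySem.Dict.empty

-- A's recursion threading the mutated dict; out-of-range x[i-1]/f[j-1] is excluded by Pre_,
-- so the .getD 0 default is never the value used there
def pvGoA (x f : List Int) (n : Int) (i : Int) (ult : Int) (d : PySem.Dict (Int × Int) Int) :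
    Int × PySem.Dict (Int × Int) Int :=
  if _h : n < i then (0, d)
  else
    match d.get? (i, ult) with
    | some v => (v, d)
    | none =>
      let r1 := pvGoA x f n (i + 1) ult d
      let j := i - ult
      let kills_i := min ((PySem.List.pyGet? x (i - 1)).getD 0) ((PySem.List.pyGet? f (j - 1)).getD 0)
      let r2 := pvGoA x f n (i + 1) i r1.2
      let mx := max r1.1 (kills_i + r2.1)
      (mx, r2.2.insert (i, ult) mx)
termination_by (n + 1 - i).toNat
decreasing_by all_goals omega

def maximizar_kills_bt_py (x : List Int) (f : List Int) (n : Int) (i : Int) (ult_atq : Int) (mejor_estado : List (Int × Int × Int)) : Int :=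
  (pvGoA x f n i ult_atq (pvToDict mejor_estado)).1

-- ===== PORT B =====
-- best kills from minute `desde` onward when the last attack happened at minute u;
-- W[t+1] is always present on the executed range, so .getD 0 is exact
def pvMejorConUltimo (x f : List Int) (n : Int) (W : PySem.Dict Int Int) (desde u : Int) : Int :=
  (PySem.List.pyRange desde (n + 1) 1).foldl
    (fun best t =>
      max best (min ((PySem.List.pyGet? x (t - 1)).getD 0) ((PySem.List.pyGet? f (t - 1 - u)).getD 0)
        + W.getD (t + 1) 0))
    0

def maximizar_kills_bt_py_alt (x : List Int) (f : List Int) (n : Int) (i : Int) (ult_atq : Int) (mejor_estado : List (Int × Int × Int)) : Int :=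
  if n < i then 0
  else
    let W := (PySem.List.pyRange n i (-1)).foldl
      (fun W j => W.insert j (pvMejorConUltimo x f n W j (j - 1)))
      ((PySem.Dict.empty : PySem.Dict Int Int).insert (n + 1) 0)
    pvMejorConUltimo x f n W i ult_atq

-- ===== PRECONDITION & SPEC =====
-- Pre_ excludes (a) inputs on which the Python A raises IndexError (the DP rectangle touches an
-- index of x or f outside Python's valid range), and (b) inputs whose mejor_estado already caches
-- an entry at a state the search reaches: there A's result echoes whatever arbitrary value the
-- caller pre-seeded (a corner no specification covers, and the entry can also hide an out-of-range
-- index on which both clean computations raise).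
def Pre_maximizar_kills_bt_py (x : List Int) (f : List Int) (n : Int) (i : Int) (ult_atq : Int) (mejor_estado : List (Int × Int × Int)) : Prop :=
  n < i ∨ ((-(x.length : Int) ≤ i - 1 ∧ n - 1 < (x.length : Int) ∧
            -(f.length : Int) ≤ i - 1 - ult_atq ∧ n - 1 - ult_atq < (f.length : Int) ∧
            (i < n → n - 1 - i < (f.length : Int))) ∧
           ∀ t ∈ mejor_estado, ¬(i ≤ t.1 ∧ t.1 ≤ n ∧ (t.2.1 = ult_atq ∨ (i ≤ t.2.1 ∧ t.2.1 < t.1))))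
instance (x : List Int) (f : List Int) (n : Int) (i : Int) (ult_atq : Int) (mejor_estado : List (Int × Int × Int)) : Decidable (Pre_maximizar_kills_bt_py x f n i ult_atq mejor_estado) := by unfold Pre_maximizar_kills_bt_py; infer_instance

def pvWitness_maximizar_kills_bt_py : List Int × List Int × Int × Int × Int × (List (Int × Int × Int)) :=
  ([1], [1], 1, 1, 0, [])

def Spec_maximizar_kills_bt_py (x : List Int) (f : List Int) (n : Int) (i : Int) (ult_atq : Int) (mejor_estado : List (Int × Int × Int)) (out : Int) : Prop := out = maximizar_kills_bt_py_alt x f n i ult_atq mejor_estado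
instance (x : List Int) (f : List Int) (n : Int) (i : Int) (ult_atq : Int) (mejor_estado : List (Int × Int × Int)) (out : Int) : Decidable (Spec_maximizar_kills_bt_py x f n i ult_atq mejor_estado out) := by unfold Spec_maximizar_kills_bt_py; infer_instance

-- ===== CLAIM (what is proved, stated in full; the proofs are below) =====
def Claim_equal_maximizar_kills_bt_py : Prop := ∀ (x : List Int) (f : List Int) (n : Int) (i : Int) (ult_atq : Int) (mejor_estado : List (Int × Int × Int)), Dom_maximizar_kills_bt_py x f n i ult_atq mejor_estado → Pre_maximizar_kills_bt_py x f n i ult_atq mejor_estado → Spec_maximizar_kills_bt_py x f n i ult_atq mejor_estado (maximizar_kills_bt_py x f n i ult_atq mejor_estado)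

-- ===== LEMMAS AND PROOFS =====

-- the mathematical value of state (i, u): the clean recurrence, no memo
def pvV (x f : List Int) (n i u : Int) : Int :=
  if _h : n < i then 0
  else
    max (pvV x f n (i + 1) u)
      (min ((PySem.List.pyGet? x (i - 1)).getD 0) ((PySem.List.pyGet? f (i - u - 1)).getD 0)
        + pvV x f n (i + 1) i)
termination_by (n + 1 - i).toNat
decreasing_by all_goals omega

-- invariant on the threaded dict: at every state reachable from (i0, u0) (and ≤ n, so consulted),
-- an entry can only hold the clean value
def pvH (x f : List Int) (n i0 u0 : Int) (d : PySem.Dict (Int × Int) Int) : Prop :=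
  ∀ a b v, ¬ n < a → (i0 ≤ a ∧ (b = u0 ∨ (i0 ≤ b ∧ b < a))) →
    d.get? (a, b) = some v → v = pvV x f n a b

lemma pvGoA_correct (x f : List Int) (n i0 u0 : Int) : ∀ (m : Nat) (i u : Int)
    (d : PySem.Dict (Int × Int) Int), (n + 1 - i).toNat = m →
    (i0 ≤ i ∧ (u = u0 ∨ (i0 ≤ u ∧ u < i))) → pvH x f n i0 u0 d →
    (pvGoA x f n i u d).1 = pvV x f n i u ∧ pvH x f n i0 u0 (pvGoA x f n i u d).2 := by
  intro m
  induction m with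
  | zero =>
      intro i u d hm hr hd
      have hni : n < i := by omega
      rw [pvGoA]
      simp only [dif_pos hni]
      exact ⟨by rw [pvV]; simp [hni], hd⟩
  | succ m IH =>
      intro i u d hm hr hd
      rw [pvGoA]
      by_cases hni : n < i
      · simp only [dif_pos hni]
        exact ⟨by rw [pvV]; simp [hni], hd⟩
      · simp only [dif_neg hni]
        cases hdg : d.get? (i, u) with
        | some v =>
            dsimp only
            exact ⟨hd i u v hni hr hdg, hd⟩
        | none =>
            dsimp only
            obtain ⟨e1, j1⟩ := IH (i + 1) u d (by omega) ⟨by omega, by omega⟩ hd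
            obtain ⟨e2, j2⟩ := IH (i + 1) i (pvGoA x f n (i + 1) u d).2 (by omega)
              ⟨by omega, by omega⟩ j1
            have hval : max (pvGoA x f n (i + 1) u d).1
                (min ((PySem.List.pyGet? x (i - 1)).getD 0) ((PySem.List.pyGet? f (i - u - 1)).getD 0)
                  + (pvGoA x f n (i + 1) i (pvGoA x f n (i + 1) u d).2).1)
                = pvV x f n i u := by
              rw [pvV]
              simp only [dif_neg hni]
              rw [e1, e2]
            refine ⟨hval, ?_⟩
            intro a b v ha hab hv
            rw [PySem.Dict.get?_insert] at hv
            split at hv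
            · rename_i hk
              injection hk with hai hbu
              injection hv with hveq
              subst hai; subst hbu
              rw [← hveq]; exact hval
            · exact j2 a b v ha hab hv

-- a key absent from the association list is absent from pvToDict
lemma pvToDict_get?_none (l : List (Int × Int × Int)) (k : Int × Int)
    (h : ∀ t ∈ l, (t.1, t.2.1) ≠ k) : (pvToDict l).get? k = none := by
  suffices hgen : ∀ (d : PySem.Dict (Int × Int) Int), d.get? k = none →
      (l.foldl (fun d t => d.insert (t.1, t.2.1) t.2.2) d).get? k = none by
    exact hgen PySem.Dict.empty (by simp [PySem.Dict.get?_empty])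
  induction l with
  | nil => intro d hdk; simpa using hdk
  | cons a l IH =>
      intro d hdk
      simp only [List.foldl_cons]
      refine IH (fun t ht => h t (List.mem_cons_of_mem _ ht)) _ ?_
      rw [PySem.Dict.get?_insert]
      split
      · rename_i hk; exact absurd hk.symm (h a (List.mem_cons_self ..))
      · exact hdk

-- folding max over a list distributes over max in the initial accumulator
lemma pvFoldlMaxShift (g : Int → Int) (l : List Int) (a b : Int) :
    l.foldl (fun acc s => max acc (g s)) (max a b) =
      max a (l.foldl (fun acc s => max acc (g s)) b) := by
  induction l generalizing b with
  | nil => rfl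
  | cons h l IH =>
      simp only [List.foldl_cons]
      rw [max_assoc, IH]

-- the inner loop computes the clean value, given the table is correct above `desde`
lemma pvMejor_eq (x f : List Int) (n : Int) : ∀ (m : Nat) (W : PySem.Dict Int Int) (desde u : Int),
    (n + 1 - desde).toNat = m →
    (∀ s, desde ≤ s → s ≤ n → W.getD (s + 1) 0 = pvV x f n (s + 1) s) →
    pvMejorConUltimo x f n W desde u = pvV x f n desde u := by
  intro m
  induction m with
  | zero =>
      intro W desde u hm hW
      have hnd : n < desde := by omega
      unfold pvMejorConUltimo
      rw [PySem.List.pyRange_one_eq_nil (by omega : n + 1 ≤ desde)]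
      rw [pvV]; simp [hnd]
  | succ m IH =>
      intro W desde u hm hW
      have hnd : ¬ n < desde := by omega
      unfold pvMejorConUltimo
      rw [PySem.List.pyRange_one_cons (by omega : desde < n + 1)]
      simp only [List.foldl_cons]
      have hstep : max 0 (min ((PySem.List.pyGet? x (desde - 1)).getD 0)
            ((PySem.List.pyGet? f (desde - 1 - u)).getD 0) + W.getD (desde + 1) 0)
          = max (min ((PySem.List.pyGet? x (desde - 1)).getD 0)
            ((PySem.List.pyGet? f (desde - 1 - u)).getD 0) + W.getD (desde + 1) 0) 0 :=
        max_comm _ _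
      rw [hstep, pvFoldlMaxShift]
      have hrec : (PySem.List.pyRange (desde + 1) (n + 1) 1).foldl
          (fun best t => max best (min ((PySem.List.pyGet? x (t - 1)).getD 0)
            ((PySem.List.pyGet? f (t - 1 - u)).getD 0) + W.getD (t + 1) 0)) 0
          = pvV x f n (desde + 1) u := by
        have := IH W (desde + 1) u (by omega)
          (fun s hs1 hs2 => hW s (by omega) hs2)
        unfold pvMejorConUltimo at this
        exact this
      rw [hrec, hW desde le_rfl (by omega)]
      conv_rhs => rw [pvV]
      rw [dif_neg hnd, max_comm]
      have hidx : desde - 1 - u = desde - u - 1 := by ring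
      rw [hidx]

-- the W-building fold: after processing levels n .. j+1, the table holds pvV at every level above j
lemma pvWTable (x f : List Int) (n i : Int) : ∀ (m : Nat) (j : Int), (n - j).toNat = m → i ≤ j →
    ∀ s, j ≤ s → s ≤ n →
      (((PySem.List.pyRange n j (-1)).foldl
          (fun W jj => W.insert jj (pvMejorConUltimo x f n W jj (jj - 1)))
          ((PySem.Dict.empty : PySem.Dict Int Int).insert (n + 1) 0)).getD (s + 1) 0)
        = pvV x f n (s + 1) s := by
  intro m
  induction m with
  | zero =>
      intro j hm hij s hs1 hs2
      have hjn : n ≤ j := by omega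
      have hsn : s = n := by omega
      rw [PySem.List.pyRange_neg_one_eq_nil hjn]
      simp only [List.foldl_nil]
      subst hsn
      rw [PySem.Dict.getD_eq_get?_getD, PySem.Dict.get?_insert]
      rw [pvV]; simp
  | succ m IH =>
      intro j hm hij s hs1 hs2
      have hjn : j + 1 ≤ n := by omega
      have hsplit : PySem.List.pyRange n j (-1) = PySem.List.pyRange n (j + 1) (-1) ++ [j + 1] := by
        rw [PySem.List.pyRange_neg_one_eq_reverse, PySem.List.pyRange_neg_one_eq_reverse,
            PySem.List.pyRange_one_cons (by omega : j + 1 < n + 1)]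
        simp [show j + 1 + 1 = j + 2 by ring]
      rw [hsplit, List.foldl_append, List.foldl_cons, List.foldl_nil]
      have hprev := IH (j + 1) (by omega) (by omega)
      have hins : pvMejorConUltimo x f n
          ((PySem.List.pyRange n (j + 1) (-1)).foldl
            (fun W jj => W.insert jj (pvMejorConUltimo x f n W jj (jj - 1)))
            ((PySem.Dict.empty : PySem.Dict Int Int).insert (n + 1) 0)) (j + 1) j
          = pvV x f n (j + 1) j :=
        pvMejor_eq x f n (n + 1 - (j + 1)).toNat _ (j + 1) j rfl
          (fun s hs1 hs2 => hprev s hs1 hs2)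
      rw [PySem.Dict.getD_eq_get?_getD, PySem.Dict.get?_insert]
      by_cases hsj : s + 1 = j + 1
      · have hsj' : s = j := by omega
        subst hsj'
        simpa using hins
      · simp only [if_neg hsj]
        rw [← PySem.Dict.getD_eq_get?_getD]
        exact hprev s (by omega) hs2

-- ===== VERDICT (by name: the statement is the Claim_ definition above) =====
theorem maximizar_kills_bt_py_spec : Claim_equal_maximizar_kills_bt_py := by
  intro x f n i ult_atq mejor_estado _hdom hpre
  unfold Spec_maximizar_kills_bt_py maximizar_kills_bt_py maximizar_kills_bt_py_alt
  by_cases hni : n < i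
  · simp only [hni, if_true]
    rw [pvGoA]; simp [hni]
  · simp only [hni, if_false]
    rcases hpre with hlt | ⟨_, hmemo⟩
    · exact absurd hlt hni
    have hH : pvH x f n i ult_atq (pvToDict mejor_estado) := by
      intro a b v ha hab hv
      have hnone : (pvToDict mejor_estado).get? (a, b) = none := by
        refine pvToDict_get?_none mejor_estado (a, b) ?_
        intro t ht hk
        have h1 : t.1 = a := congrArg Prod.fst hk
        have h2 : t.2.1 = b := congrArg Prod.snd hk
        exact hmemo t ht ⟨by omega, by omega, by omega⟩
      rw [hnone] at hv; cases hv
    have hA := pvGoA_correct x f n i ult_atq (n + 1 - i).toNat i ult_atq (pvToDict mejor_estado)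
      rfl ⟨le_rfl, Or.inl rfl⟩ hH
    rw [hA.1]
    exact (pvMejor_eq x f n (n + 1 - i).toNat _ i ult_atq rfl
      (fun s hs1 hs2 => pvWTable x f n i (n - i).toNat i rfl le_rfl s hs1 hs2)).symm
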